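-- pv_equiv track=rewrite | github.com/cappuchinese/Introduction-Python | script7/script07_Lisa.py | origin
-- ===== SOURCE A (Python) =====
-- def origin(section_dict):
--     """
--     Function searches for sequence and formats it
--     Parameter:
--         the filled dictionary
--     Return:
--         sequence in right format
--     """
--     var1 = section_dict["ORIGIN"]
--     sequence = ""
--     new_line = ""
--     for line in var1:
--         line = line.strip()
--         for char in line:
--             if char.isalpha():
--                 sequence += char.upper()
--             else:
--                 pass
--
--     sequence = sequence.strip()
--
--     for startposition in range(0, len(sequence), 70):
--         new_line += sequence[startposition:startposition + 70] + "\n"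
--
--     return new_line
-- ===== SOURCE B (Python) =====
-- def origin(section_dict):
--     """Single streaming pass: emit uppercased alpha chars, inserting a newline
--     after every 70th emitted char and one trailing newline for a partial last line."""
--     out = []
--     count = 0
--     for line in section_dict["ORIGIN"]:
--         for char in line.strip():
--             if char.isalpha():
--                 out.append(char.upper())
--                 count += 1
--                 if count % 70 == 0:
--                     out.append("\n")
--     if count % 70 != 0:
--         out.append("\n")
--     return "".join(out)
-- ===== Notes on version B (the rewrite author's own statement) =====
-- stated objective: alternative
-- what changed: Replaces A's build-full-sequence-then-rechunk-by-slicing (a second pass over range(0,len,70)) with a single streaming pass that keeps a running count and emits the newline after every 70th alphabetic character, never materialising or slicing the intermediate sequence.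
import Mathlib
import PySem

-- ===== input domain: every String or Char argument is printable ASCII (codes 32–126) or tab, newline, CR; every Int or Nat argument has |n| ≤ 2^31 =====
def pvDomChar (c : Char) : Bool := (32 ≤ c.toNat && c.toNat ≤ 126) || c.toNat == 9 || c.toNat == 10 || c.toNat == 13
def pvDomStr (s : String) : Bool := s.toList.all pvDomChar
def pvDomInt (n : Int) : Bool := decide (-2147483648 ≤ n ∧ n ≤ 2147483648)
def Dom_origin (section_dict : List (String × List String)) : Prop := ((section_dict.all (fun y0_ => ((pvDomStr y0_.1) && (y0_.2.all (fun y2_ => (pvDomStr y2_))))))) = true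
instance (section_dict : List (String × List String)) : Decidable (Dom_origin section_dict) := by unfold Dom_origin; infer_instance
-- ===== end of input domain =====

-- B replaces A's build-full-sequence-then-rechunk-by-slicing with a single streaming
-- pass that keeps a running count and inserts '\n' after every 70th emitted character
-- (alternative decomposition, same asymptotic cost).

-- ===== PORT A =====
-- inner loop body: 'if char.isalpha(): sequence += char.upper()'
def originCharStep (s : List Char) (c : Char) : List Char :=
  if PySem.Chars.isalpha c then s ++ [PySem.Chars.upperChar c] else s

-- outer loop body: 'line = line.strip(); for char in line: …'
def originLineStep (seq : List Char) (line : String) : List Char :=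
  (PySem.Chars.strip line.toList).foldl originCharStep seq

def origin (section_dict : List (String × List String)) : String :=
  let var1 : List String :=
    ((section_dict.find? (fun p => p.1 == "ORIGIN")).map Prod.snd).getD []
  let sequence : List Char := var1.foldl originLineStep []
  let sequence : List Char := PySem.Chars.strip sequence
  let new_line : List Char :=
    (PySem.List.pyRange 0 (sequence.length : Int) 70).foldl
      (fun nl sp =>
        nl ++ (PySem.List.slice sequence (some sp) (some (sp + 70)) ++ ['\n'])) []
  String.ofList new_line

-- ===== PORT B =====
-- inner loop body of Source B: append upper char, bump count, newline at multiples of 70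
def altCharStep (st : List Char × Nat) (c : Char) : List Char × Nat :=
  if PySem.Chars.isalpha c then
    let out := st.1 ++ [PySem.Chars.upperChar c]
    let n := st.2 + 1
    (if n % 70 == 0 then out ++ ['\n'] else out, n)
  else st

def altLineStep (st : List Char × Nat) (line : String) : List Char × Nat :=
  (PySem.Chars.strip line.toList).foldl altCharStep st

def origin_alt (section_dict : List (String × List String)) : String :=
  let var1 : List String :=
    ((section_dict.find? (fun p => p.1 == "ORIGIN")).map Prod.snd).getD []
  let st : List Char × Nat := var1.foldl altLineStep ([], 0)
  String.ofList (if st.2 % 70 == 0 then st.1 else st.1 ++ ['\n'])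

-- ===== PRECONDITION & SPEC =====
-- A does section_dict["ORIGIN"]: it raises KeyError exactly when the key is absent.
def Pre_origin (section_dict : List (String × List String)) : Prop :=
  "ORIGIN" ∈ section_dict.map Prod.fst
instance (section_dict : List (String × List String)) : Decidable (Pre_origin section_dict) := by
  unfold Pre_origin; infer_instance

def pvWitness_origin : (List (String × List String)) := [("ORIGIN", ["ac gt"])]

def Spec_origin (section_dict : List (String × List String)) (out : String) : Prop := out = origin_alt section_dict
instance (section_dict : List (String × List String)) (out : String) : Decidable (Spec_origin section_dict out) := by unfold Spec_origin; infer_instance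

-- ===== CLAIM (what is proved, stated in full; the proofs are below) =====
def Claim_equal_origin : Prop := ∀ (section_dict : List (String × List String)), Dom_origin section_dict → Pre_origin section_dict → Spec_origin section_dict (origin section_dict)

-- ===== LEMMAS AND PROOFS =====

-- the uppercased alphabetic characters contributed by one (stripped) line
def pvUpA (line : String) : List Char :=
  ((PySem.Chars.strip line.toList).filter PySem.Chars.isalpha).map PySem.Chars.upperChar

-- A's rechunking, as a recursion: 70-char blocks, each followed by '\n'
def pvChunks (s : List Char) : List Char :=
  if _h : s = [] then [] else s.take 70 ++ '\n' :: pvChunks (s.drop 70)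
  termination_by s.length
  decreasing_by
    simp only [List.length_drop]
    have := List.length_pos_iff.mpr _h
    omega

-- B's stream: chars interleaved with '\n' after every 70th, counting from n
def pvEmit : Nat → List Char → List Char
  | _, [] => []
  | n, c :: cs => c :: (if (n + 1) % 70 = 0 then '\n' :: pvEmit (n + 1) cs else pvEmit (n + 1) cs)

-- B's inner loop body, with the alpha filter and upper-casing already applied
def pvStream (st : List Char × Nat) (c : Char) : List Char × Nat :=
  (st.1 ++ c :: (if (st.2 + 1) % 70 = 0 then ['\n'] else []), st.2 + 1)

lemma lineStep_eq (seq : List Char) (line : String) :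
    originLineStep seq line = seq ++ pvUpA line :=
  PySem.List.foldl_append_if PySem.Chars.isalpha PySem.Chars.upperChar
    (PySem.Chars.strip line.toList) seq

lemma seq_eq (var1 : List String) :
    var1.foldl originLineStep [] = var1.flatMap pvUpA := by
  rw [PySem.List.foldl_congr_mem var1 originLineStep (fun acc line => acc ++ pvUpA line) []
    (fun acc x _ => lineStep_eq acc x)]
  simpa using PySem.List.foldl_append_eq_flatMap pvUpA var1 []

lemma isspace_upperChar {c : Char} (h : PySem.Chars.isalpha c = true) :
    PySem.Chars.isspace (PySem.Chars.upperChar c) = false := by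
  have e1 : 'a'.val.toNat = 97 := rfl
  have e2 : 'z'.val.toNat = 122 := rfl
  have e3 : 'A'.val.toNat = 65 := rfl
  have e4 : 'Z'.val.toNat = 90 := rfl
  have e5 : c.toNat = c.val.toNat := rfl
  simp only [PySem.Chars.isalpha, PySem.Chars.isupper, PySem.Chars.islower, Bool.or_eq_true,
    Bool.and_eq_true, decide_eq_true_eq, Char.le_def, UInt32.le_iff_toNat_le] at h
  have key : 65 ≤ (PySem.Chars.upperChar c).toNat ∧ (PySem.Chars.upperChar c).toNat ≤ 90 := by
    unfold PySem.Chars.upperChar PySem.Chars.islower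
    split_ifs with hl
    · simp only [Bool.and_eq_true, decide_eq_true_eq, Char.le_def,
        UInt32.le_iff_toNat_le] at hl
      rw [Char.toNat_ofNat, if_pos (Or.inl (by omega))]
      omega
    · simp only [Bool.and_eq_true, decide_eq_true_eq, Char.le_def,
        UInt32.le_iff_toNat_le, not_and_or, not_le] at hl
      omega
  unfold PySem.Chars.isspace
  simp only [Bool.or_eq_false_iff, Bool.and_eq_false_iff, decide_eq_false_iff_not]
  omega

lemma dropWhile_no (t : List Char) (ht : ∀ c ∈ t, PySem.Chars.isspace c = false) :
    t.dropWhile PySem.Chars.isspace = t := by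
  cases t with
  | nil => rfl
  | cons a l => rw [List.dropWhile_cons, if_neg (by simp [ht a (by simp)])]

lemma strip_eq_self {s : List Char} (h : ∀ c ∈ s, PySem.Chars.isspace c = false) :
    PySem.Chars.strip s = s := by
  unfold PySem.Chars.strip PySem.Chars.lstrip PySem.Chars.rstrip
  rw [dropWhile_no s h, dropWhile_no s.reverse (fun c hc => h c (List.mem_reverse.mp hc)),
    List.reverse_reverse]

lemma strip_flatMap_upA (var1 : List String) :
    PySem.Chars.strip (var1.flatMap pvUpA) = var1.flatMap pvUpA := by
  apply strip_eq_self
  intro c hc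
  rcases List.mem_flatMap.mp hc with ⟨line, _, hcl⟩
  rcases List.mem_map.mp hcl with ⟨d, hd, rfl⟩
  exact isspace_upperChar (List.mem_filter.mp hd).2

lemma pyRange70_cons (a b : Int) (h : a < b) :
    PySem.List.pyRange a b 70 = a :: PySem.List.pyRange (a + 70) b 70 := by
  rw [PySem.List.pyRange_of_pos a b (by norm_num),
      PySem.List.pyRange_of_pos (a + 70) b (by norm_num)]
  have hm : (if a < b then ((b - a + 70 - 1) / 70).toNat else 0)
      = (if a + 70 < b then ((b - (a + 70) + 70 - 1) / 70).toNat else 0) + 1 := by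
    rw [if_pos h]
    split_ifs with h2 <;> omega
  rw [hm, List.range_succ_eq_map, List.map_cons, List.map_map]
  congr 1
  · simp
  · apply List.map_congr_left
    intro k _
    simp only [Function.comp_apply]
    push_cast
    ring

lemma chunkA_aux (k : Nat) (s acc : List Char) :
    (PySem.List.pyRange ((70 * k : Nat) : Int) (s.length : Int) 70).foldl
      (fun nl sp => nl ++ (PySem.List.slice s (some sp) (some (sp + 70)) ++ ['\n'])) acc
    = acc ++ pvChunks (s.drop (70 * k)) := by
  by_cases h : 70 * k < s.length
  · rw [pyRange70_cons _ _ (by exact_mod_cast h), List.foldl_cons]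
    have hsl : PySem.List.slice s (some ((70 * k : Nat) : Int)) (some (((70 * k : Nat) : Int) + 70))
        = (s.drop (70 * k)).take 70 := by
      have := PySem.List.slice_natCast_add s (70 * k) 70
      simpa using this
    have hrec := chunkA_aux (k + 1) s (acc ++ ((s.drop (70 * k)).take 70 ++ ['\n']))
    have hcast : ((70 * k : Nat) : Int) + 70 = ((70 * (k + 1) : Nat) : Int) := by push_cast; ring
    rw [hsl, hcast, hrec]
    have hne : s.drop (70 * k) ≠ [] := by
      intro he
      have := congrArg List.length he
      simp at this
      omega
    conv_rhs => rw [pvChunks, dif_neg hne]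
    rw [List.drop_drop]
    have h2 : 70 * k + 70 = 70 * (k + 1) := by ring
    rw [h2]
    simp [List.append_assoc]
  · have hnil : PySem.List.pyRange ((70 * k : Nat) : Int) (s.length : Int) 70 = [] := by
      rw [PySem.List.pyRange_of_pos _ _ (by norm_num : (0:Int) < 70), if_neg (by exact_mod_cast h)]
      simp
    have hdrop : s.drop (70 * k) = [] := List.drop_eq_nil_of_le (by omega)
    rw [hnil, hdrop]
    simp [pvChunks]
  termination_by s.length - 70 * k
  decreasing_by omega

lemma pvEmit_mod (cs : List Char) : ∀ n, pvEmit n cs = pvEmit (n % 70) cs := by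
  induction cs with
  | nil => intro n; rfl
  | cons c cs ih =>
    intro n
    have h1 : (n + 1) % 70 = (n % 70 + 1) % 70 := by omega
    simp only [pvEmit, h1, ih (n + 1), ih (n % 70 + 1)]

lemma pvEmit_append (a b : List Char) : ∀ n, pvEmit n (a ++ b) = pvEmit n a ++ pvEmit (n + a.length) b := by
  induction a with
  | nil => simp [pvEmit]
  | cons c cs ih =>
    intro n
    simp only [List.cons_append, pvEmit, ih (n + 1), List.length_cons]
    split_ifs <;> simp [Nat.add_assoc, Nat.add_comm 1 cs.length]

lemma pvEmit_small (cs : List Char) : ∀ n, n < 70 → n + cs.length ≤ 70 →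
    pvEmit n cs = cs ++ (if n + cs.length = 70 then ['\n'] else []) := by
  induction cs with
  | nil => intro n h1 h2; simp [pvEmit]; omega
  | cons c cs ih =>
    intro n h1 h2
    simp only [List.length_cons] at h2 ⊢
    by_cases h70 : n + 1 = 70
    · have hcs : cs = [] := by
        cases cs with
        | nil => rfl
        | cons d ds => exfalso; simp at h2; omega
      subst hcs
      simp [pvEmit, h70]
    · have : (n + 1) % 70 ≠ 0 := by omega
      simp only [pvEmit, if_neg this, ih (n + 1) (by omega) (by omega)]
      have : n + 1 + cs.length = n + (cs.length + 1) := by omega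
      rw [this]
      simp

lemma emit_chunks (s : List Char) :
    pvEmit 0 s ++ (if s.length % 70 = 0 then [] else ['\n']) = pvChunks s := by
  by_cases hle : s.length ≤ 70
  · rcases eq_or_ne s [] with rfl | hne
    · simp [pvEmit, pvChunks]
    · rw [pvEmit_small s 0 (by omega) (by omega)]
      conv_rhs => rw [pvChunks, dif_neg hne]
      have hpos : 0 < s.length := List.length_pos_iff.mpr hne
      rw [List.take_of_length_le hle, List.drop_eq_nil_of_le hle]
      by_cases h70 : s.length = 70
      · simp [h70, pvChunks]
      · have hm : s.length % 70 ≠ 0 := by omega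
        simp [h70, hm, pvChunks]
  · have hne : s ≠ [] := by intro h; subst h; simp at hle
    conv_rhs => rw [pvChunks, dif_neg hne]
    have hsplit : s = s.take 70 ++ s.drop 70 := (List.take_append_drop 70 s).symm
    conv_lhs => rw [hsplit]
    rw [pvEmit_append, List.length_take, pvEmit_small (s.take 70) 0 (by omega) (by simp)]
    have hlt : (s.take 70).length = 70 := by simp; omega
    rw [pvEmit_mod]
    have h0 : min 70 s.length = 70 := by omega
    rw [h0]
    have ih := emit_chunks (s.drop 70)
    rw [show (70 : Nat) % 70 = 0 from rfl] at *
    simp only [List.length_take, h0, List.length_drop] at *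
    rw [List.append_assoc]
    have hfin : (List.take 70 s ++ List.drop 70 s).length = s.length := by rw [← hsplit]
    rw [hfin, show s.length % 70 = (s.length - 70) % 70 by omega, ih]
    simp
  termination_by s.length
  decreasing_by simp; omega

lemma altInner (cs : List Char) : ∀ st : List Char × Nat,
    cs.foldl altCharStep st =
      ((cs.filter PySem.Chars.isalpha).map PySem.Chars.upperChar).foldl pvStream st := by
  induction cs with
  | nil => intro st; rfl
  | cons c cs ih =>
    intro st
    by_cases hc : PySem.Chars.isalpha c
    · simp only [List.foldl_cons, List.filter_cons, hc, if_true, List.map_cons]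
      rw [ih]
      congr 1
      simp only [altCharStep, pvStream, hc, if_true]
      split_ifs with h1 h2 h2 <;> simp_all
    · simp only [List.foldl_cons, List.filter_cons, hc, Bool.false_eq_true, if_false]
      rw [show altCharStep st c = st by simp [altCharStep, hc]]
      exact ih st

lemma stream_foldl (cs : List Char) : ∀ st : List Char × Nat,
    cs.foldl pvStream st = (st.1 ++ pvEmit st.2 cs, st.2 + cs.length) := by
  induction cs with
  | nil => intro st; simp [pvEmit]
  | cons c cs ih =>
    intro st
    simp only [List.foldl_cons, pvStream, ih, pvEmit, List.length_cons]
    split_ifs <;> simp <;> omega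

lemma altLineStep_eq (st : List Char × Nat) (line : String) :
    altLineStep st line = (st.1 ++ pvEmit st.2 (pvUpA line), st.2 + (pvUpA line).length) := by
  unfold altLineStep pvUpA
  rw [altInner, stream_foldl]

lemma altFold (var1 : List String) : ∀ st : List Char × Nat,
    var1.foldl altLineStep st
    = (st.1 ++ pvEmit st.2 (var1.flatMap pvUpA), st.2 + (var1.flatMap pvUpA).length) := by
  induction var1 with
  | nil => intro st; simp [pvEmit]
  | cons line rest ih =>
    intro st
    rw [List.foldl_cons, altLineStep_eq, ih]
    simp only [List.flatMap_cons, pvEmit_append, List.length_append]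
    rw [Prod.mk.injEq]
    exact ⟨by simp [List.append_assoc], by omega⟩

-- ===== VERDICT (by name: the statement is the Claim_ definition above) =====
theorem origin_spec : Claim_equal_origin := by
  intro sd _ _
  unfold Spec_origin origin origin_alt
  simp only []
  set var1 : List String := ((sd.find? (fun p => p.1 == "ORIGIN")).map Prod.snd).getD [] with hv
  set S : List Char := var1.flatMap pvUpA with hS
  have hA : var1.foldl originLineStep [] = S := seq_eq var1
  rw [hA, strip_flatMap_upA]
  have hchunk := chunkA_aux 0 S []
  simp only [Nat.mul_zero, Nat.cast_zero, List.drop_zero, List.nil_append] at hchunk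
  rw [hchunk]
  have hB := altFold var1 ([], 0)
  simp only [List.nil_append, Nat.zero_add] at hB
  rw [hB]
  by_cases hmod : S.length % 70 = 0
  · have : (S.length % 70 == 0) = true := by simp [hmod]
    rw [this, if_pos rfl]
    have := emit_chunks S
    rw [if_pos hmod] at this
    simp only [List.append_nil] at this
    rw [this]
  · have : (S.length % 70 == 0) = false := by simp [hmod]
    rw [this]
    simp only [Bool.false_eq_true, if_false]
    have := emit_chunks S
    rw [if_neg hmod] at this
    rw [this]
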